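-- pv_equiv track=rewrite | github.com/Vibology/VibologyOS | System/Scripts/fix_markdown_spacing.py | is_hr_line
-- ===== SOURCE A (Python) =====
-- def is_hr_line(line: str) -> bool:
--     """Check if a line is a horizontal rule (---, ***, ___)."""
--     stripped = line.strip()
--     if len(stripped) < 3:
--         return False
--     return (
--         all(c == '-' for c in stripped) or
--         all(c == '*' for c in stripped) or
--         all(c == '_' for c in stripped)
--     )
-- ===== SOURCE B (Python) =====
-- def is_hr_line(line: str) -> bool:
--     """Check if a line is a horizontal rule (---, ***, ___)."""
--     # single left-to-right pass with early exit; no strip(), no second scan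
--     rule = None        # the rule character once fixed
--     count = 0          # how many rule characters seen
--     after_ws = False   # whitespace seen after the rule characters started
--     for c in line:
--         if c.isspace():
--             if rule is not None:
--                 after_ws = True
--         elif (rule is None or c == rule) and not after_ws and c in '-*_':
--             rule = c
--             count += 1
--         else:
--             return False
--     return count >= 3
-- ===== Notes on version B (the rewrite author's own statement) =====
-- stated objective: alternative
-- what changed: Replaces strip-then-three-OR'd-all()-scans over the stripped copy with a single left-to-right state machine over the raw line (rule char, count, trailing-whitespace flag) with early exit and no strip().
import Mathlib
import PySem

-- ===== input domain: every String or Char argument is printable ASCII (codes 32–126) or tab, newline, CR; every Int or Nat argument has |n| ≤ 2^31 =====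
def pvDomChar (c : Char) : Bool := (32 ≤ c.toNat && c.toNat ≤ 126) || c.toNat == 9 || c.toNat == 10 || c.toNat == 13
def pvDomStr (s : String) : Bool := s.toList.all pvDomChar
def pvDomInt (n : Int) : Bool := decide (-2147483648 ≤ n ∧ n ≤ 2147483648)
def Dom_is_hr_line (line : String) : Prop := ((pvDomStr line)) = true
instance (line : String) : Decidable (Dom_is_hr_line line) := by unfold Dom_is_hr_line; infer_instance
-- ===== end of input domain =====

-- B replaces A's strip + three OR'd all()-scans with ONE left-to-right state machine over the raw
-- line (rule char / count / trailing-whitespace flag, early exit); same cost, different control flow.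

-- ===== PORT A =====
def is_hr_line (line : String) : Bool :=
  let stripped := (PySem.Str.strip line).toList
  if stripped.length < 3 then false
  else stripped.all (· == '-') || stripped.all (· == '*') || stripped.all (· == '_')

-- ===== PORT B =====
-- the for-loop of Source B: state (rule, count, after_ws); 'return False' = the final else branch
def isHrLoop (cs : List Char) (rule : Option Char) (count : Nat) (afterWs : Bool) : Bool :=
  match cs with
  | [] => decide (3 ≤ count)
  | c :: rest =>
    if PySem.Chars.isspace c then
      isHrLoop rest rule count (afterWs || rule.isSome)
    else if (rule.isNone || rule == some c) && !afterWs && ['-', '*', '_'].contains c then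
      isHrLoop rest (some c) (count + 1) afterWs
    else false

def is_hr_line_alt (line : String) : Bool := isHrLoop line.toList none 0 false

-- ===== PRECONDITION & SPEC =====
def Spec_is_hr_line (line : String) (out : Bool) : Prop := out = is_hr_line_alt line
instance (line : String) (out : Bool) : Decidable (Spec_is_hr_line line out) := by unfold Spec_is_hr_line; infer_instance

-- ===== CLAIM (what is proved, stated in full; the proofs are below) =====
def Claim_equal_is_hr_line : Prop := ∀ (line : String), Dom_is_hr_line line → Spec_is_hr_line line (is_hr_line line)

-- ===== LEMMAS AND PROOFS =====

-- after trailing whitespace has begun, the loop succeeds iff the rest is all whitespace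
lemma isHrLoop_afterWs (m : List Char) (r : Option Char) (k : Nat) :
    isHrLoop m r k true = (decide (3 ≤ k) && m.all PySem.Chars.isspace) := by
  induction m generalizing r with
  | nil => simp [isHrLoop]
  | cons c m ih =>
    by_cases hc : PySem.Chars.isspace c
    · simp [isHrLoop, hc, ih]
    · simp [isHrLoop, hc]

-- with the rule fixed to c (no trailing ws yet): count the c-run, then the rest must be whitespace
lemma isHrLoop_rule (c : Char) (hc : ¬ PySem.Chars.isspace c = true) (m : List Char) (k : Nat)
    (hr : (['-', '*', '_'] : List Char).contains c = true) :
    isHrLoop m (some c) k false =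
      (decide (3 ≤ k + (m.takeWhile (· == c)).length) && (m.dropWhile (· == c)).all PySem.Chars.isspace) := by
  induction m generalizing k with
  | nil => simp [isHrLoop]
  | cons x m ih =>
    by_cases hx : x = c
    · subst hx
      have h1 : isHrLoop (x :: m) (some x) k false = isHrLoop m (some x) (k + 1) false := by
        simp [isHrLoop, hc]
        intro _
        simpa using hr
      rw [h1, ih (k + 1), List.takeWhile_cons, List.dropWhile_cons]
      simp only [beq_self_eq_true, if_true, List.length_cons]
      have e : k + 1 + (m.takeWhile (· == x)).length
          = k + ((m.takeWhile (· == x)).length + 1) := by omega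
      rw [e]
    · have hcx : (c == x) = false := by simp [Ne.symm hx]
      have hxc : (x == c) = false := by simp [hx]
      by_cases hsx : PySem.Chars.isspace x
      · simp [isHrLoop, hsx, hxc, isHrLoop_afterWs]
      · simp [isHrLoop, hsx, hcx, hxc]

-- leading whitespace is skipped (rule still none, afterWs stays false)
lemma isHrLoop_lstrip (l : List Char) :
    isHrLoop l none 0 false = isHrLoop (l.dropWhile PySem.Chars.isspace) none 0 false := by
  induction l with
  | nil => rfl
  | cons c l ih =>
    by_cases hc : PySem.Chars.isspace c
    · simp [isHrLoop, hc, ih]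
    · simp [hc]

-- rstrip past a non-space head
lemma rstrip_cons (c : Char) (t : List Char) (hc : ¬ PySem.Chars.isspace c = true) :
    PySem.Chars.rstrip (c :: t) = c :: PySem.Chars.rstrip t := by
  unfold PySem.Chars.rstrip
  rw [List.reverse_cons, List.dropWhile_append]
  by_cases h : (t.reverse.dropWhile PySem.Chars.isspace).isEmpty
  · simp [h, List.dropWhile_cons, hc, List.isEmpty_iff.mp h]
  · simp [h]

lemma rstrip_eq_nil_iff (t : List Char) :
    PySem.Chars.rstrip t = [] ↔ t.all PySem.Chars.isspace = true := by
  simp [PySem.Chars.rstrip, List.dropWhile_eq_nil_iff, List.all_eq_true]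

lemma rstrip_prefix (t : List Char) : PySem.Chars.rstrip t <+: t := by
  have h := List.dropWhile_suffix (l := t.reverse) (p := PySem.Chars.isspace)
  have h2 := List.reverse_prefix.mpr h
  simpa [PySem.Chars.rstrip] using h2

lemma rstrip_replicate_append (c : Char) (hc : ¬ PySem.Chars.isspace c = true) (n : Nat) (d : List Char) :
    PySem.Chars.rstrip (List.replicate n c ++ d) = List.replicate n c ++ PySem.Chars.rstrip d := by
  induction n with
  | zero => simp
  | succ n ih =>
    simp only [List.replicate_succ, List.cons_append]
    rw [rstrip_cons c _ hc, ih]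

lemma rstrip_all_space (c : Char) (j : Nat) (d : List Char)
    (hd : d.all PySem.Chars.isspace = true) (hc : ¬ PySem.Chars.isspace c = true) :
    PySem.Chars.rstrip (List.replicate j c ++ d) = List.replicate j c := by
  induction j with
  | zero =>
    simp only [List.replicate, List.nil_append]
    exact (rstrip_eq_nil_iff d).mpr hd
  | succ j ih =>
    simp only [List.replicate_succ, List.cons_append]
    rw [rstrip_cons c _ hc, ih]

-- takeWhile (· == c) is a replicate of c
lemma takeWhile_eq_replicate (c : Char) (t : List Char) :
    t.takeWhile (· == c) = List.replicate (t.takeWhile (· == c)).length c := by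
  induction t with
  | nil => rfl
  | cons x t ih =>
    by_cases hx : x = c
    · subst hx; simp [List.takeWhile_cons, List.replicate_succ]; exact ih
    · simp [List.takeWhile_cons, hx]

theorem is_hr_line_spec : Claim_equal_is_hr_line := by
  intro line _
  unfold Spec_is_hr_line is_hr_line is_hr_line_alt
  show (if (PySem.Str.strip line).toList.length < 3 then false
      else ((PySem.Str.strip line).toList.all (· == '-') ||
        (PySem.Str.strip line).toList.all (· == '*') ||
        (PySem.Str.strip line).toList.all (· == '_')))
    = isHrLoop line.toList none 0 false
  rw [isHrLoop_lstrip]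
  have hstrip : (PySem.Str.strip line).toList
      = PySem.Chars.rstrip (line.toList.dropWhile PySem.Chars.isspace) := by
    simp [PySem.Str.toList_strip, PySem.Chars.strip, PySem.Chars.lstrip]
  rw [hstrip]
  cases hcore : line.toList.dropWhile PySem.Chars.isspace with
  | nil => simp [isHrLoop, PySem.Chars.rstrip]
  | cons c t =>
    have hc : ¬ PySem.Chars.isspace c = true := by
      have := List.head?_dropWhile_not (p := PySem.Chars.isspace) (l := line.toList)
      rw [hcore] at this; simpa using this
    rw [rstrip_cons c t hc]
    by_cases hr : (['-', '*', '_'] : List Char).contains c = true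
    · -- rule char found
      have hstep : isHrLoop (c :: t) none 0 false = isHrLoop t (some c) 1 false := by
        simp [isHrLoop, hc]
        intro _
        simpa using hr
      rw [hstep, isHrLoop_rule c hc t 1 hr]
      set j := (t.takeWhile (· == c)).length with hj
      by_cases hws : (t.dropWhile (· == c)).all PySem.Chars.isspace = true
      · -- tail after the run is all whitespace: strip line = c^(j+1)
        have ht : PySem.Chars.rstrip t = List.replicate j c := by
          conv_lhs => rw [← List.takeWhile_append_dropWhile (p := (· == c)) (l := t)]
          rw [takeWhile_eq_replicate, ← hj]
          exact rstrip_all_space c j _ hws hc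
        rw [ht, hws]
        have hrep : c :: List.replicate j c = List.replicate (j + 1) c := by
          simp [List.replicate_succ]
        rw [hrep]
        by_cases hlen : j + 1 < 3
        · have h3 : ¬ (3 ≤ 1 + j) := by omega
          simp [hlen, h3]
        · have h3 : 3 ≤ 1 + j := by omega
          simp only [List.length_replicate, if_neg hlen, h3, decide_true, Bool.and_true]
          have hall : ∀ r : Char, (List.replicate (j + 1) c).all (· == r) = decide (c = r) := by
            intro r
            by_cases hcr : c = r
            · subst hcr; simp
            · simp [hcr]
          rw [hall, hall, hall]
          rcases (by simpa using hr : c = '-' ∨ c = '*' ∨ c = '_') with h | h | h <;> subst h <;> decide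
      · -- a non-whitespace char after the run: both sides false
        rw [Bool.eq_iff_iff]
        simp only [hws, Bool.and_false, Bool.false_eq_true, iff_false]
        set d := t.dropWhile (· == c) with hd
        have hdne : PySem.Chars.rstrip d ≠ [] := by
          intro h; exact hws ((rstrip_eq_nil_iff d).mp h)
        obtain ⟨x, d', hxd⟩ := List.exists_cons_of_ne_nil hdne
        have hxmem : x ∈ PySem.Chars.rstrip d := by rw [hxd]; exact List.mem_cons_self
        have hxd0 : (x == c) = false := by
          have hpre := rstrip_prefix d
          rw [hxd] at hpre
          obtain ⟨rest, hrest⟩ := hpre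
          have hhead : d.head? = some x := by rw [← hrest]; rfl
          have := List.head?_dropWhile_not (p := (· == c)) (l := t)
          rw [← hd, hhead] at this; simpa using this
        have hct : PySem.Chars.rstrip t = t.takeWhile (· == c) ++ PySem.Chars.rstrip d := by
          conv_lhs => rw [← List.takeWhile_append_dropWhile (p := (· == c)) (l := t), ← hd,
            takeWhile_eq_replicate]
          rw [rstrip_replicate_append c hc, ← takeWhile_eq_replicate]
        rw [hct]
        -- strip line = c :: run ++ rstrip d, containing both c and x with x ≠ c
        split_ifs with hlen
        · simp
        · have hcmem : c ∈ c :: (t.takeWhile (· == c) ++ PySem.Chars.rstrip d) := List.mem_cons_self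
          have hxmem2 : x ∈ c :: (t.takeWhile (· == c) ++ PySem.Chars.rstrip d) := by
            simp [hxmem]
          have hxc : x ≠ c := by simpa using hxd0
          simp only [Bool.or_eq_true, not_or]
          refine ⟨⟨?_, ?_⟩, ?_⟩ <;>
            · intro hall
              rw [List.all_eq_true] at hall
              have h1 := hall c hcmem
              have h2 := hall x hxmem2
              simp at h1 h2
              exact hxc (h2.trans h1.symm)
    · -- first non-space char is not a rule char: both false
      have hB : isHrLoop (c :: t) none 0 false = false := by
        simp only [isHrLoop, if_neg hc]
        simp [Bool.not_eq_true] at hr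
        simp [hr]
      rw [hB]
      split_ifs with hlen
      · rfl
      · have hcm : c ∈ c :: PySem.Chars.rstrip t := List.mem_cons_self
        have hne : ∀ r : Char, c ≠ r → ¬ (c :: PySem.Chars.rstrip t).all (· == r) = true := by
          intro r hcr hall
          rw [List.all_eq_true] at hall
          have := hall c hcm
          simp at this
          exact hcr this
        simp at hr
        obtain ⟨h1, h2, h3⟩ := hr
        simp only [Bool.or_eq_false_iff]
        refine ⟨⟨?_, ?_⟩, ?_⟩
        · exact Bool.eq_false_iff.mpr (hne '-' (by simpa using h1))
        · exact Bool.eq_false_iff.mpr (hne '*' (by simpa using h2))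
        · exact Bool.eq_false_iff.mpr (hne '_' (by simpa using h3))
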